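-- pv_equiv track=rewrite | github.com/heangchihav/fastapi | src/services/security.py | _check_suspicious_headers
-- ===== SOURCE A (Python) =====
-- def _check_suspicious_headers(headers: dict) -> dict:
--     """Check for suspicious headers."""
--     suspicious = {}
--
--     # List of potentially dangerous headers
--     dangerous_headers = [
--         "x-forwarded-for",
--         "x-real-ip",
--         "x-remote-addr",
--         "x-originating-ip",
--         "x-remote-ip"
--     ]
--
--     for header in dangerous_headers:
--         if header in headers.keys():
--             suspicious[header] = "Potentially dangerous header detected"
--
--     return suspicious
-- ===== SOURCE B (Python) =====
-- _MSG = "Potentially dangerous header detected"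
-- _DANGEROUS = ("x-forwarded-for", "x-real-ip", "x-remote-addr",
--               "x-originating-ip", "x-remote-ip")
--
--
-- def _check_suspicious_headers(headers: dict) -> dict:
--     """Check for suspicious headers (single pass over the input)."""
--     found = set()
--     for key in headers:
--         if key in _DANGEROUS:
--             found.add(key)
--     return {h: _MSG for h in _DANGEROUS if h in found}
-- ===== Notes on version B (the rewrite author's own statement) =====
-- stated objective: alternative
-- what changed: Reversed traversal: one pass over the input headers collecting the dangerous keys present into a set, then the report is emitted from the fixed five-name tuple, instead of probing the headers dict once per fixed name.
import Mathlib
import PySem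

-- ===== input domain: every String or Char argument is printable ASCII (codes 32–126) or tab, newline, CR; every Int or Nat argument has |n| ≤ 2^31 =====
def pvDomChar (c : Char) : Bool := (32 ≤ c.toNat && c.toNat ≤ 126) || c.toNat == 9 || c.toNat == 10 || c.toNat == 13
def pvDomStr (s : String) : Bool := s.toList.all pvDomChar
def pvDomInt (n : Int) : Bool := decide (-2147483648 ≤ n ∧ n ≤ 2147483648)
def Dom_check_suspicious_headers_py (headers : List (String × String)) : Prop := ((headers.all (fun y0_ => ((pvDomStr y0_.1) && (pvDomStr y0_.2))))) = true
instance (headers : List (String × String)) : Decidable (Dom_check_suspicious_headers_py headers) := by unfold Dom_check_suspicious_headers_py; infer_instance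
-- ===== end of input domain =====

-- B reverses the traversal: one pass over the headers collecting which dangerous names are
-- present into a set, then the report is emitted from the fixed five-name list (objective: alternative).

-- ===== PORT A =====
def check_suspicious_headers_py (headers : List (String × String)) : List (String × String) :=
  let dangerous_headers : List String :=
    ["x-forwarded-for", "x-real-ip", "x-remote-addr", "x-originating-ip", "x-remote-ip"]
  (dangerous_headers.foldl
    (fun suspicious header =>
      if (headers.map Prod.fst).contains header then
        suspicious.insert header "Potentially dangerous header detected"
      else suspicious)
    PySem.Dict.empty).items

-- ===== PORT B =====
def pvDangerous : List String :=
  ["x-forwarded-for", "x-real-ip", "x-remote-addr", "x-originating-ip", "x-remote-ip"]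

def check_suspicious_headers_py_alt (headers : List (String × String)) : List (String × String) :=
  let found : PySem.Set String :=
    headers.foldl
      (fun s kv => if pvDangerous.contains kv.1 then PySem.Set.add s kv.1 else s)
      PySem.Set.empty
  -- the dict comprehension iterates the distinct literal names, so its items are exactly
  -- the filtered names paired with the message
  (pvDangerous.filter (fun h => PySem.Set.contains found h)).map
    (fun h => (h, "Potentially dangerous header detected"))

-- ===== PRECONDITION & SPEC =====
def Spec_check_suspicious_headers_py (headers : List (String × String)) (out : List (String × String)) : Prop := out = check_suspicious_headers_py_alt headers
instance (headers : List (String × String)) (out : List (String × String)) : Decidable (Spec_check_suspicious_headers_py headers out) := by unfold Spec_check_suspicious_headers_py; infer_instance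

-- ===== CLAIM (what is proved, stated in full; the proofs are below) =====
def Claim_equal_check_suspicious_headers_py : Prop := ∀ (headers : List (String × String)), Dom_check_suspicious_headers_py headers → Spec_check_suspicious_headers_py headers (check_suspicious_headers_py headers)

-- ===== LEMMAS AND PROOFS =====

-- A's loop over fresh distinct keys appends exactly the filtered pairs.
theorem items_fold_if_insert (m : String) (l : List String) (cond : String → Bool)
    (d : PySem.Dict String String) (hn : l.Nodup) (hd : ∀ a ∈ l, d.contains a = false) :
    (l.foldl (fun s h => if cond h then s.insert h m else s) d).items
      = d.items ++ (l.filter cond).map (fun h => (h, m)) := by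
  induction l generalizing d with
  | nil => simp
  | cons x l ih =>
    rcases List.nodup_cons.mp hn with ⟨hx, hn'⟩
    by_cases hc : cond x
    · have hfresh : ∀ a ∈ l, (d.insert x m).contains a = false := by
        intro a ha
        have hax : a ≠ x := fun h => hx (h ▸ ha)
        rw [PySem.Dict.contains_insert]
        simp [hax, hd a (List.mem_cons_of_mem _ ha)]
      have := ih (d.insert x m) hn' hfresh
      simp only [List.foldl_cons, hc, if_true, this,
        PySem.Dict.items_insert_of_not_contains d m (hd x (List.mem_cons_self))]
      simp [hc]
    · have := ih d hn' (fun a ha => hd a (List.mem_cons_of_mem _ ha))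
      simp [hc, this]

-- membership in B's collected set
theorem mem_found (hs : List (String × String)) (s : PySem.Set String) (k : String) :
    (k ∈ hs.foldl
        (fun s kv => if pvDangerous.contains kv.1 then PySem.Set.add s kv.1 else s) s)
      ↔ (k ∈ s ∨ (k ∈ pvDangerous ∧ k ∈ hs.map Prod.fst)) := by
  induction hs generalizing s with
  | nil => simp
  | cons kv hs ih =>
    by_cases hc : pvDangerous.contains kv.1
    · have hcm : kv.1 ∈ pvDangerous := by simpa using hc
      simp only [List.foldl_cons, hc, if_true, ih, PySem.Set.mem_add, List.map_cons,
        List.mem_cons]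
      constructor
      · rintro (⟨h | rfl⟩ | h)
        · exact Or.inl h
        · exact Or.inr ⟨hcm, Or.inl rfl⟩
        · exact Or.inr ⟨h.1, Or.inr h.2⟩
      · rintro (h | ⟨hk, rfl | h⟩)
        · exact Or.inl (Or.inl h)
        · exact Or.inl (Or.inr rfl)
        · exact Or.inr ⟨hk, h⟩
    · simp only [List.foldl_cons, hc, ih, List.map_cons, List.mem_cons]
      constructor
      · rintro (h | h)
        · exact Or.inl h
        · exact Or.inr ⟨h.1, Or.inr h.2⟩
      · rintro (h | ⟨hk, rfl | h⟩)
        · exact Or.inl h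
        · exact absurd (by simpa using hk) (by simpa using hc)
        · exact Or.inr ⟨hk, h⟩

theorem check_suspicious_headers_py_spec : Claim_equal_check_suspicious_headers_py := by
  unfold Claim_equal_check_suspicious_headers_py
  intro headers _
  unfold Spec_check_suspicious_headers_py
  simp only [check_suspicious_headers_py, check_suspicious_headers_py_alt]
  rw [items_fold_if_insert _ _ _ _ (by decide) (fun a _ => PySem.Dict.contains_empty a)]
  have hlit : (["x-forwarded-for", "x-real-ip", "x-remote-addr", "x-originating-ip",
      "x-remote-ip"] : List String) = pvDangerous := rfl
  rw [hlit, show (PySem.Dict.empty : PySem.Dict String String).items = [] from rfl,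
    List.nil_append]
  congr 1
  apply List.filter_congr
  intro h hmem
  have hfound : (h ∈ headers.foldl
      (fun s kv => if pvDangerous.contains kv.1 then PySem.Set.add s kv.1 else s)
      PySem.Set.empty) ↔ h ∈ headers.map Prod.fst := by
    rw [mem_found]
    simp [PySem.Set.empty, hmem]
  rw [Bool.eq_iff_iff, List.contains_iff_mem, PySem.Set.contains_iff]
  exact hfound.symm

-- ===== VERDICT (by name: the statement is the Claim_ definition above) =====
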